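-- pv_equiv track=rewrite | github.com/asigalov61/midicap | midicap/fast_analyzer.py | _count_tremolo
-- ===== SOURCE A (Python) =====
-- from typing import Any, Dict, List, Optional, Tuple, Set
--
-- def _count_tremolo(notes: List[Tuple[int, int, int]], tpb: int) -> int:
--     count, i = 0, 0
--     n = len(notes)
--     if n < 4:
--         return 0
--     rapid = tpb // 4
--     while i < n - 3:
--         seg = notes[i:i+4]
--         if len({s[2] for s in seg}) == 1:
--             starts = [s[0] for s in seg]
--             if all(0 < starts[j+1] - starts[j] <= rapid for j in range(3)):
--                 count += 1
--                 i += 4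
--                 continue
--         i += 1
--     return count
-- ===== SOURCE B (Python) =====
-- from typing import List, Tuple
--
-- def _count_tremolo(notes: List[Tuple[int, int, int]], tpb: int) -> int:
--     # Run-length decomposition: each maximal chain of L linked adjacent pairs
--     # (same pitch, gap in (0, tpb//4]) yields (L+1)//4 tremolos.
--     rapid = tpb // 4
--     total = 0
--     run = 0
--     for a, b in zip(notes, notes[1:]):
--         if a[2] == b[2] and 0 < b[0] - a[0] <= rapid:
--             run += 1
--         else:
--             total += (run + 1) // 4
--             run = 0
--     return total + (run + 1) // 4
-- ===== Notes on version B (the rewrite author's own statement) =====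
-- stated objective: alternative
-- what changed: B abandons the greedy window scan with its skip-4/advance-1 pointer: it decomposes the piece into maximal runs of linked adjacent pairs (same pitch, gap in (0, tpb//4]) in one fold and adds the closed form (run_length+1)//4 per run, which is proved equal to the greedy count.
import Mathlib
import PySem

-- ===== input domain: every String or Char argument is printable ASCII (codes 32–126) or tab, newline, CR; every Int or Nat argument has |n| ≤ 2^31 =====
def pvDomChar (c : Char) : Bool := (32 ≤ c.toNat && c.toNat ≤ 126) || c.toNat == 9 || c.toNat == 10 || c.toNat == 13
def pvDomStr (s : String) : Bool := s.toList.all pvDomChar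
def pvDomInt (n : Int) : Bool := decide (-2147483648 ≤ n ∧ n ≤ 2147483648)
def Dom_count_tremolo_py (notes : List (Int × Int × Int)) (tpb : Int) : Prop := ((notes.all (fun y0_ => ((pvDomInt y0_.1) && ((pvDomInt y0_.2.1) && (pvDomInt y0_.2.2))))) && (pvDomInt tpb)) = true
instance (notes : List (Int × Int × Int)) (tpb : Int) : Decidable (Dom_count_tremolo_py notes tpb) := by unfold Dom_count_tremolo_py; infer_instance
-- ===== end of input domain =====

-- B replaces A's greedy skip-4/advance-1 window scan by a run-length decomposition:
-- one fold over adjacent pairs that sums the closed form (run+1)//4 per maximal run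
-- of linked pairs; 'alternative' objective, return value proved equal.

-- ===== PORT A =====
-- the while loop of A: i advances by 4 on a match, by 1 otherwise
def ctA_loop (notes : List (Int × Int × Int)) (rapid : Int) (n i : Nat) (count : Int) : Int :=
  if h : i < n - 3 then
    let seg := PySem.List.slice notes (some (i : Int)) (some ((i : Int) + 4))
    if (PySem.Set.ofList (seg.map (fun s => s.2.2))).length = 1 then
      let starts := seg.map (fun s => s.1)
      if (PySem.List.pyRange 0 3 1).all (fun j =>
            decide (0 < PySem.List.pyGetD starts (j + 1) 0 - PySem.List.pyGetD starts j 0) &&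
            decide (PySem.List.pyGetD starts (j + 1) 0 - PySem.List.pyGetD starts j 0 ≤ rapid)) then
        ctA_loop notes rapid n (i + 4) (count + 1)
      else
        ctA_loop notes rapid n (i + 1) count
    else
      ctA_loop notes rapid n (i + 1) count
  else count
termination_by n - i
decreasing_by all_goals omega

def count_tremolo_py (notes : List (Int × Int × Int)) (tpb : Int) : Int :=
  let n := notes.length
  if n < 4 then 0
  else ctA_loop notes (PySem.Int.floordiv tpb 4) n 0 0

-- ===== PORT B =====
-- the loop body of Source B: extend the current run, or flush it with (run+1)//4
def bstep (rapid : Int) (st : Int × Int) (ab : (Int × Int × Int) × (Int × Int × Int)) : Int × Int :=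
  if ab.1.2.2 == ab.2.2.2 && decide (0 < ab.2.1 - ab.1.1) && decide (ab.2.1 - ab.1.1 ≤ rapid)
  then (st.1, st.2 + 1)
  else (st.1 + PySem.Int.floordiv (st.2 + 1) 4, 0)

def count_tremolo_py_alt (notes : List (Int × Int × Int)) (tpb : Int) : Int :=
  let rapid := PySem.Int.floordiv tpb 4
  let st := (notes.zip notes.tail).foldl (bstep rapid) (0, 0)
  st.1 + PySem.Int.floordiv (st.2 + 1) 4

-- ===== PRECONDITION & SPEC =====
def Spec_count_tremolo_py (notes : List (Int × Int × Int)) (tpb : Int) (out : Int) : Prop := out = count_tremolo_py_alt notes tpb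
instance (notes : List (Int × Int × Int)) (tpb : Int) (out : Int) : Decidable (Spec_count_tremolo_py notes tpb out) := by unfold Spec_count_tremolo_py; infer_instance

-- ===== CLAIM =====
def Claim_equal_count_tremolo_py : Prop := ∀ (notes : List (Int × Int × Int)) (tpb : Int), Dom_count_tremolo_py notes tpb → Spec_count_tremolo_py notes tpb (count_tremolo_py notes tpb)

-- ===== LEMMAS AND PROOFS =====

-- proof-side view of one link: same pitch and gap in (0, rapid]
def lk (rapid : Int) (a b : Int × Int × Int) : Bool :=
  (a.2.2 == b.2.2) && decide (0 < b.1 - a.1) && decide (b.1 - a.1 ≤ rapid)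

-- the link table of a note list
def links (rapid : Int) (notes : List (Int × Int × Int)) : List Bool :=
  (notes.zip notes.tail).map (fun ab => lk rapid ab.1 ab.2)

-- structural form of A's greedy scan, on the link list
def G : List Bool → Int
  | a :: b :: c :: rest => if a && b && c then 1 + G rest.tail else G (b :: c :: rest)
  | _ => 0
termination_by l => l.length
decreasing_by
  all_goals simp [List.length_tail]
  all_goals omega

-- run-length accumulator form of B, on the link list
def R : List Bool → Nat → Int
  | [], r => (((r + 1) / 4 : Nat) : Int)
  | true :: t, r => R t (r + 1)
  | false :: t, r => (((r + 1) / 4 : Nat) : Int) + R t 0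

lemma length_links (rapid : Int) (l : List (Int × Int × Int)) :
    (links rapid l).length = l.length - 1 := by
  simp [links]

lemma G_short (l : List Bool) (h : l.length ≤ 2) : G l = 0 := by
  match l with
  | [] => rw [G] <;> simp
  | [a] => rw [G] <;> simp
  | [a, b] => rw [G] <;> simp

lemma G_false_cons (t : List Bool) : G (false :: t) = G t := by
  match t with
  | [] => rw [G, G] <;> simp
  | [x] => rw [G, G] <;> simp
  | x :: y :: u => rw [G] <;> simp

lemma G_tf_cons (t : List Bool) : G (true :: false :: t) = G t := by
  match t with
  | [] => rw [G, G] <;> simp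
  | x :: u => rw [G] <;> simp [G_false_cons]

-- the core combinatorial fact: the greedy count equals the run-length sum
lemma G_eq_R : ∀ (n : Nat) (l : List Bool) (r : Nat), l.length ≤ n → r % 4 = 0 →
    R l r = ((r / 4 : Nat) : Int) + G l := by
  intro n
  induction n with
  | zero =>
    intro l r hl hr
    match l with
    | [] =>
      rw [R, G_short [] (by simp)]
      have : (r + 1) / 4 = r / 4 := by omega
      simp [this]
  | succ n ih =>
    intro l r hl hr
    match l with
    | [] =>
      rw [R, G_short [] (by simp)]
      have : (r + 1) / 4 = r / 4 := by omega
      simp [this]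
    | [a] =>
      have hG : G [a] = 0 := G_short _ (by simp)
      cases a <;> rw [R] <;> rw [R] <;> rw [hG] <;>
        · have h1 : (r + 2) / 4 = r / 4 := by omega
          have h2 : (r + 1) / 4 = r / 4 := by omega
          simp [h1, h2]
    | [a, b] =>
      have hG : G [a, b] = 0 := G_short _ (by simp)
      cases a <;> cases b <;> rw [R] <;> rw [R] <;> rw [R] <;> rw [hG] <;>
        · have h1 : (r + 3) / 4 = r / 4 := by omega
          have h2 : (r + 2) / 4 = r / 4 := by omega
          have h3 : (r + 1) / 4 = r / 4 := by omega
          simp [h1, h2, h3]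
    | a :: b :: c :: rest =>
      by_cases habc : (a && b && c) = true
      · simp only [Bool.and_eq_true] at habc
        obtain ⟨⟨rfl, rfl⟩, rfl⟩ := habc
        have hGl : G (true :: true :: true :: rest) = 1 + G rest.tail := by
          rw [G]; simp
        rw [R, R, R, hGl]
        have h4 : (r + 4) / 4 = r / 4 + 1 := by omega
        match rest with
        | [] =>
          rw [R, List.tail_nil, G_short [] (by simp), h4]
          push_cast
          ring
        | d :: rest' =>
          have hlen : rest'.length ≤ n := by simp at hl; omega
          cases d
          · rw [R, ih rest' 0 hlen (by omega), List.tail_cons, h4]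
            simp only [Nat.zero_div]
            push_cast
            ring
          · rw [R, ih rest' (r + 4) hlen (by omega), List.tail_cons, h4]
            push_cast
            ring
      · have hGl : G (a :: b :: c :: rest) = G (b :: c :: rest) := by
          rw [G]; simp [habc]
        rw [hGl]
        cases a
        · rw [R, ih (b :: c :: rest) 0 (by simp at hl ⊢; omega) (by omega)]
          have : (r + 1) / 4 = r / 4 := by omega
          simp [this]
        · cases b
          · rw [R, R, ih (c :: rest) 0 (by simp at hl ⊢; omega) (by omega)]
            have : (r + 2) / 4 = r / 4 := by omega
            simp [this, G_false_cons]
          · have hc : c = false := by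
              cases c
              · rfl
              · simp at habc
            subst hc
            rw [R, R, R, ih rest 0 (by simp at hl ⊢; omega) (by omega)]
            have : (r + 3) / 4 = r / 4 := by omega
            simp [this, G_tf_cons]

-- a 4-element Python set has one element iff all four values are equal
lemma set4_len_one (p q r s : Int) :
    (PySem.Set.ofList [p, q, r, s]).length = 1 ↔ (p = q ∧ q = r ∧ r = s) := by
  simp [PySem.Set.ofList, PySem.Set.add, PySem.Set.contains]
  split_ifs <;> simp_all <;> omega

lemma drop_decomp (notes : List (Int × Int × Int)) (i : Nat) (h : i + 4 ≤ notes.length) :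
    ∃ a b c d t, notes.drop i = a :: b :: c :: d :: t := by
  have hlen : 4 ≤ (notes.drop i).length := by simp; omega
  match hd : notes.drop i with
  | a :: b :: c :: d :: t => exact ⟨a, b, c, d, t, rfl⟩
  | [] | [_] | [_, _] | [_, _, _] => simp [hd] at hlen

lemma tail_links (rapid : Int) (d : Int × Int × Int) (t : List (Int × Int × Int)) :
    (links rapid (d :: t)).tail = links rapid t := by
  cases t <;> rfl

-- A's loop equals the structural greedy scan on the link table of the note suffix
lemma ctA_eq_G (notes : List (Int × Int × Int)) (rapid : Int) :
    ∀ (m i : Nat) (count : Int), notes.length - i ≤ m →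
    ctA_loop notes rapid notes.length i count = count + G (links rapid (notes.drop i)) := by
  intro m
  induction m with
  | zero =>
    intro i count h
    rw [ctA_loop]
    have hni : ¬ i < notes.length - 3 := by omega
    have hz : G (links rapid (notes.drop i)) = 0 :=
      G_short _ (by rw [length_links]; simp; omega)
    simp [hni, hz]
  | succ m ih =>
    intro i count h
    rw [ctA_loop]
    by_cases hlt : i < notes.length - 3
    · simp only [hlt, dif_pos]
      have h4 : i + 4 ≤ notes.length := by omega
      obtain ⟨a, b, c, d, t, hd⟩ := drop_decomp notes i h4
      have hseg : PySem.List.slice notes (some (i : Int)) (some ((i : Int) + 4)) =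
          [a, b, c, d] := by
        have := PySem.List.slice_natCast_add notes i 4
        rw [show ((4 : Nat) : Int) = (4 : Int) by norm_num] at this
        rw [this, hd]; rfl
      have hdrop1 : notes.drop (i + 1) = b :: c :: d :: t := by
        rw [← List.tail_drop, hd]; rfl
      have hdrop4 : notes.drop (i + 4) = t := by
        rw [show i + 4 = (i + 3) + 1 by omega, ← List.tail_drop,
            show i + 3 = (i + 2) + 1 by omega, ← List.tail_drop,
            show i + 2 = (i + 1) + 1 by omega, ← List.tail_drop, hdrop1]; rfl
      have hlinks : links rapid (notes.drop i) =
          lk rapid a b :: lk rapid b c :: lk rapid c d :: links rapid (d :: t) := by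
        rw [hd]; rfl
      have hlinks1 : links rapid (b :: c :: d :: t) =
          lk rapid b c :: lk rapid c d :: links rapid (d :: t) := rfl
      have hrange : PySem.List.pyRange 0 3 1 = [0, 1, 2] := by decide
      by_cases hc : (lk rapid a b && lk rapid b c && lk rapid c d) = true
      · have hc' := hc
        simp only [lk, Bool.and_eq_true, beq_iff_eq, decide_eq_true_eq] at hc'
        have hset : (PySem.Set.ofList
            ((PySem.List.slice notes (some (i : Int)) (some ((i : Int) + 4))).map
              (fun s => s.2.2))).length = 1 := by
          rw [hseg]; simp [set4_len_one]; omega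
        rw [if_pos hset]
        have hall : (PySem.List.pyRange 0 3 1).all (fun j =>
            decide (0 < PySem.List.pyGetD ((PySem.List.slice notes (some (i : Int)) (some ((i : Int) + 4))).map (fun s => s.1)) (j + 1) 0 -
                        PySem.List.pyGetD ((PySem.List.slice notes (some (i : Int)) (some ((i : Int) + 4))).map (fun s => s.1)) j 0) &&
            decide (PySem.List.pyGetD ((PySem.List.slice notes (some (i : Int)) (some ((i : Int) + 4))).map (fun s => s.1)) (j + 1) 0 -
                        PySem.List.pyGetD ((PySem.List.slice notes (some (i : Int)) (some ((i : Int) + 4))).map (fun s => s.1)) j 0 ≤ rapid)) = true := by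
          rw [hseg, hrange]
          simp [PySem.List.pyGetD_ofNat', List.all]
          omega
        rw [if_pos hall]
        rw [ih (i + 4) (count + 1) (by omega), hdrop4, hlinks]
        have hG : G (lk rapid a b :: lk rapid b c :: lk rapid c d :: links rapid (d :: t)) =
            1 + G (links rapid t) := by
          rw [G, if_pos hc, tail_links]
        rw [hG]; ring
      · have hstep : ctA_loop notes rapid notes.length (i + 1) count =
            count + G (links rapid (notes.drop i)) := by
          rw [ih (i + 1) count (by omega), hdrop1, hlinks, hlinks1]
          rw [G, if_neg hc]
        by_cases hset : (PySem.Set.ofList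
            ((PySem.List.slice notes (some (i : Int)) (some ((i : Int) + 4))).map
              (fun s => s.2.2))).length = 1
        · rw [if_pos hset]
          have hp : a.2.2 = b.2.2 ∧ b.2.2 = c.2.2 ∧ c.2.2 = d.2.2 := by
            rw [hseg] at hset; simpa [set4_len_one] using hset
          obtain ⟨hpa, hpb, hpc⟩ := hp
          have hall : ¬ ((PySem.List.pyRange 0 3 1).all (fun j =>
              decide (0 < PySem.List.pyGetD ((PySem.List.slice notes (some (i : Int)) (some ((i : Int) + 4))).map (fun s => s.1)) (j + 1) 0 -
                          PySem.List.pyGetD ((PySem.List.slice notes (some (i : Int)) (some ((i : Int) + 4))).map (fun s => s.1)) j 0) &&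
              decide (PySem.List.pyGetD ((PySem.List.slice notes (some (i : Int)) (some ((i : Int) + 4))).map (fun s => s.1)) (j + 1) 0 -
                          PySem.List.pyGetD ((PySem.List.slice notes (some (i : Int)) (some ((i : Int) + 4))).map (fun s => s.1)) j 0 ≤ rapid)) = true) := by
            intro hall
            rw [hseg, hrange] at hall
            simp [PySem.List.pyGetD_ofNat', List.all] at hall
            apply hc
            simp only [lk, Bool.and_eq_true, beq_iff_eq, decide_eq_true_eq]
            omega
          rw [if_neg hall]
          exact hstep
        · rw [if_neg hset]
          exact hstep
    · have hz : G (links rapid (notes.drop i)) = 0 :=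
        G_short _ (by rw [length_links]; simp; omega)
      simp [hlt, hz]

-- floor division of a nonnegative numerator by 4 is Nat division
lemma fd (k : Nat) : PySem.Int.floordiv ((k : Int) + 1) 4 = (((k + 1) / 4 : Nat) : Int) := by
  rw [show ((k : Int) + 1) = (((k + 1 : Nat)) : Int) by push_cast; ring,
      show (4 : Int) = ((4 : Nat) : Int) by norm_num,
      PySem.Int.floordiv_natCast]

-- B's fold computes the run-length sum R over the link table
lemma B_fold (rapid : Int) :
    ∀ (pairs : List ((Int × Int × Int) × (Int × Int × Int))) (total : Int) (run : Nat),
    ((pairs.foldl (bstep rapid) (total, (run : Int))).1 +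
      PySem.Int.floordiv ((pairs.foldl (bstep rapid) (total, (run : Int))).2 + 1) 4)
    = total + R (pairs.map (fun ab => lk rapid ab.1 ab.2)) run := by
  intro pairs
  induction pairs with
  | nil =>
    intro total run
    simp only [List.foldl_nil, List.map_nil, R, fd]
  | cons ab ps ih =>
    intro total run
    by_cases hl : lk rapid ab.1 ab.2 = true
    · have hb : bstep rapid (total, (run : Int)) ab = (total, ((run + 1 : Nat) : Int)) := by
        simp only [bstep, lk] at hl ⊢
        rw [if_pos hl]
        push_cast; ring_nf
      rw [List.foldl_cons, hb, List.map_cons, hl, R]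
      exact ih total (run + 1)
    · have hb : bstep rapid (total, (run : Int)) ab =
          (total + (((run + 1) / 4 : Nat) : Int), ((0 : Nat) : Int)) := by
        simp only [bstep, lk] at hl ⊢
        rw [if_neg hl, fd]
        norm_num
      have hl' : lk rapid ab.1 ab.2 = false := by
        cases hlk : lk rapid ab.1 ab.2
        · rfl
        · exact absurd hlk hl
      rw [List.foldl_cons, hb, List.map_cons, hl', R, ih, ← add_assoc]

-- ===== VERDICT =====
theorem count_tremolo_py_spec : Claim_equal_count_tremolo_py := by
  intro notes tpb _
  unfold Spec_count_tremolo_py count_tremolo_py count_tremolo_py_alt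
  have hB := B_fold (PySem.Int.floordiv tpb 4) (notes.zip notes.tail) 0 0
  rw [show ((0 : Nat) : Int) = (0 : Int) by norm_num] at hB
  have hlinks : (notes.zip notes.tail).map
      (fun ab => lk (PySem.Int.floordiv tpb 4) ab.1 ab.2) =
      links (PySem.Int.floordiv tpb 4) notes := rfl
  rw [hlinks] at hB
  have hR : R (links (PySem.Int.floordiv tpb 4) notes) 0 =
      G (links (PySem.Int.floordiv tpb 4) notes) := by
    rw [G_eq_R (links (PySem.Int.floordiv tpb 4) notes).length _ 0 le_rfl (by omega)]
    norm_num
  by_cases h : notes.length < 4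
  · have hz : G (links (PySem.Int.floordiv tpb 4) notes) = 0 :=
      G_short _ (by rw [length_links]; omega)
    simp only [h, if_pos]
    simp only [hB, hR, hz]
    norm_num
  · simp only [h, if_neg, not_false_eq_true]
    rw [ctA_eq_G notes (PySem.Int.floordiv tpb 4) notes.length 0 0 (by omega), hB, hR,
        List.drop_zero]
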